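-- pv_equiv track=rewrite | github.com/ABHISHEK1139/IND-Diplomat | engine/Layer3_StateModel/binding/graph_manager.py | _generate_community_summary
-- ===== SOURCE A (Python) =====
-- from typing import List, Dict, Any, Optional
--
-- def _generate_community_summary(members: List[str], rel_types: List[str]) -> str:
--     """Generate a human-readable summary for a community."""
--     # Detect community type based on members
--     member_set = {m.lower() for m in members}
--
--     if {"india", "japan", "australia"} & member_set:
--         if "usa" in member_set or "united states" in member_set:
--             return "Indo-Pacific QUAD Partners"
--
--     if {"china", "russia"} & member_set:
--         return "Eurasian Strategic Partners"
--
--     if {"india", "bangladesh", "nepal", "bhutan", "sri lanka"} & member_set: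
--         return "South Asian Regional Partners"
--
--     if "TRADE_PARTNER" in rel_types:
--         return f"Trade Partnership Network ({len(members)} members)"
--
--     if "SIGNATORY_TO" in rel_types:
--         return f"Treaty Signatories ({len(members)} members)"
--
--     return f"Geopolitical Community ({len(members)} members)"
-- ===== SOURCE B (Python) =====
-- def _generate_community_summary(members, rel_types):
--     """Single-pass min-priority scoring instead of a cascade of set checks:
--     each member/relation contributes a numeric priority, the minimum wins."""
--     CAT = {"china": 1, "russia": 1, "india": 2, "bangladesh": 2,
--            "nepal": 2, "bhutan": 2, "sri lanka": 2}
--     anchor = False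
--     usa = False
--     best = 5
--     for m in members:
--         l = m.lower()
--         anchor = anchor or l in ("india", "japan", "australia")
--         usa = usa or l in ("usa", "united states")
--         best = min(best, CAT.get(l, 5))
--     if anchor and usa:
--         best = 0
--     for r in rel_types:
--         if r == "TRADE_PARTNER":
--             best = min(best, 3)
--         elif r == "SIGNATORY_TO":
--             best = min(best, 4)
--     n = len(members)
--     return ("Indo-Pacific QUAD Partners",
--             "Eurasian Strategic Partners",
--             "South Asian Regional Partners",
--             f"Trade Partnership Network ({n} members)",
--             f"Treaty Signatories ({n} members)",
--             f"Geopolitical Community ({n} members)")[best]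
-- ===== Notes on version B (the rewrite author's own statement) =====
-- stated objective: alternative
-- what changed: Replaced the set-intersection if-cascade by a single-pass numeric min-priority scoring: each member is looked up in a category->priority dict and two flags track the QUAD conjunction, relations contribute priorities 3/4, and the minimum priority indexes a message table.
import Mathlib
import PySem

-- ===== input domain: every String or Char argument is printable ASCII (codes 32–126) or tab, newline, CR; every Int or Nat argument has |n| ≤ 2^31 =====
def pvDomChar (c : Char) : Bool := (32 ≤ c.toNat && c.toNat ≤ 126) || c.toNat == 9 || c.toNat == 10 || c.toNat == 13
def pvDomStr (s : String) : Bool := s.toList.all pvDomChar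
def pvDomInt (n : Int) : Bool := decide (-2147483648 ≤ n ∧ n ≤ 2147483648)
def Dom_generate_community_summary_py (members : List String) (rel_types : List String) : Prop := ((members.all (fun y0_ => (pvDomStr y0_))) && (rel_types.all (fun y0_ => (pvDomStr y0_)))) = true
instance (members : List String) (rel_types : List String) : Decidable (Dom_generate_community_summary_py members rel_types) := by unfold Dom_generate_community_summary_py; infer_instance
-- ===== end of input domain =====

-- B replaces A's cascade of set intersections by a single-pass numeric min-priority
-- scoring with a category dictionary (alternative algorithm, same cost).

-- ===== PORT A =====
-- Literal port of A: the lowered member set modelled as the lowered list (membership in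
-- the Python set of lowered members = membership in the lowered list); nonempty
-- intersection with a literal set = disjunction of memberships; the fall-through after
-- the nested QUAD `if` is the local `rest`.
def generate_community_summary_py (members : List String) (rel_types : List String) : String :=
  let low := members.map PySem.Str.lower
  let n := PySem.Int.toStr (members.length : Int)
  let rest :=
    if low.contains "china" || low.contains "russia" then
      "Eurasian Strategic Partners"
    else if low.contains "india" || low.contains "bangladesh" || low.contains "nepal" ||
            low.contains "bhutan" || low.contains "sri lanka" then
      "South Asian Regional Partners"
    else if rel_types.contains "TRADE_PARTNER" then
      "Trade Partnership Network (" ++ n ++ " members)"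
    else if rel_types.contains "SIGNATORY_TO" then
      "Treaty Signatories (" ++ n ++ " members)"
    else
      "Geopolitical Community (" ++ n ++ " members)"
  if low.contains "india" || low.contains "japan" || low.contains "australia" then
    if low.contains "usa" || low.contains "united states" then
      "Indo-Pacific QUAD Partners"
    else rest
  else rest

-- ===== PORT B =====
-- B: category -> priority dictionary (CAT in Source B)
def gcsCat : PySem.Dict String Nat :=
  PySem.Dict.ofList [("china", 1), ("russia", 1), ("india", 2), ("bangladesh", 2),
                     ("nepal", 2), ("bhutan", 2), ("sri lanka", 2)]

-- loop body of Source B's member pass: state (anchor, usa, best)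
def gcsStep (st : Bool × Bool × Nat) (m : String) : Bool × Bool × Nat :=
  let l := PySem.Str.lower m
  (st.1 || (["india", "japan", "australia"].contains l),
   st.2.1 || (["usa", "united states"].contains l),
   min st.2.2 (gcsCat.getD l 5))

def generate_community_summary_py_alt (members : List String) (rel_types : List String) : String :=
  let st := members.foldl gcsStep (false, false, 5)
  let best0 := if st.1 && st.2.1 then 0 else st.2.2
  let best := rel_types.foldl (fun b r =>
      if r = "TRADE_PARTNER" then min b 3
      else if r = "SIGNATORY_TO" then min b 4
      else b) best0
  let n := PySem.Int.toStr (members.length : Int)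
  ["Indo-Pacific QUAD Partners",
   "Eurasian Strategic Partners",
   "South Asian Regional Partners",
   "Trade Partnership Network (" ++ n ++ " members)",
   "Treaty Signatories (" ++ n ++ " members)",
   "Geopolitical Community (" ++ n ++ " members)"].getD best ""

-- ===== PRECONDITION & SPEC =====
def Spec_generate_community_summary_py (members : List String) (rel_types : List String) (out : String) : Prop := out = generate_community_summary_py_alt members rel_types
instance (members : List String) (rel_types : List String) (out : String) : Decidable (Spec_generate_community_summary_py members rel_types out) := by unfold Spec_generate_community_summary_py; infer_instance

-- ===== CLAIM (what is proved, stated in full; the proofs are below) =====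
def Claim_equal_generate_community_summary_py : Prop := ∀ (members : List String) (rel_types : List String), Dom_generate_community_summary_py members rel_types → Spec_generate_community_summary_py members rel_types (generate_community_summary_py members rel_types)

-- ===== LEMMAS AND PROOFS =====

-- proof-side characterisations of B's two folds
def gcsAnch (ls : List String) : Bool :=
  ls.contains "india" || ls.contains "japan" || ls.contains "australia"
def gcsUsa (ls : List String) : Bool :=
  ls.contains "usa" || ls.contains "united states"
def gcsCatMin : List String → Nat
  | [] => 5
  | l :: ls => min (gcsCat.getD l 5) (gcsCatMin ls)

theorem gcsCat_getD (l : String) : gcsCat.getD l 5 =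
    if l = "china" then 1 else if l = "russia" then 1 else if l = "india" then 2
    else if l = "bangladesh" then 2 else if l = "nepal" then 2 else if l = "bhutan" then 2
    else if l = "sri lanka" then 2 else 5 := by
  have h : gcsCat.getD l 5 =
    (Option.map Prod.snd (List.find? (fun p => p.1 == l)
      [("china",(1:Nat)),("russia",1),("india",2),("bangladesh",2),("nepal",2),("bhutan",2),("sri lanka",2)])).getD 5 := rfl
  rw [h]
  split_ifs with h1 h2 h3 h4 h5 h6 h7
  · subst h1; rfl
  · subst h2; rfl
  · subst h3; rfl
  · subst h4; rfl
  · subst h5; rfl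
  · subst h6; rfl
  · subst h7; rfl
  · have e1 : ("china" == l) = false := beq_eq_false_iff_ne.mpr (Ne.symm h1)
    have e2 : ("russia" == l) = false := beq_eq_false_iff_ne.mpr (Ne.symm h2)
    have e3 : ("india" == l) = false := beq_eq_false_iff_ne.mpr (Ne.symm h3)
    have e4 : ("bangladesh" == l) = false := beq_eq_false_iff_ne.mpr (Ne.symm h4)
    have e5 : ("nepal" == l) = false := beq_eq_false_iff_ne.mpr (Ne.symm h5)
    have e6 : ("bhutan" == l) = false := beq_eq_false_iff_ne.mpr (Ne.symm h6)
    have e7 : ("sri lanka" == l) = false := beq_eq_false_iff_ne.mpr (Ne.symm h7)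
    simp [e1, e2, e3, e4, e5, e6, e7]

theorem gcs_fold_members (ms : List String) (a u : Bool) (b : Nat) (hb : b ≤ 5) :
    ms.foldl gcsStep (a, u, b) =
      (a || gcsAnch (ms.map PySem.Str.lower),
       u || gcsUsa (ms.map PySem.Str.lower),
       min b (gcsCatMin (ms.map PySem.Str.lower))) := by
  induction ms generalizing a u b with
  | nil =>
    simp only [List.foldl_nil, List.map_nil, gcsAnch, gcsUsa, gcsCatMin,
      List.contains_nil, Bool.or_false]
    refine congrArg _ (congrArg _ ?_)
    omega
  | cons m ms ih =>
    simp only [List.foldl_cons, List.map_cons, gcsStep]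
    rw [ih _ _ _ (by omega)]
    simp only [Prod.mk.injEq, gcsAnch, gcsUsa, gcsCatMin, List.contains_cons]
    refine ⟨?_, ?_, ?_⟩
    · simp [Bool.beq_comm, Bool.or_assoc, Bool.or_comm, Bool.or_left_comm]
    · simp [Bool.beq_comm, Bool.or_assoc, Bool.or_comm, Bool.or_left_comm]
    · omega

theorem gcs_catMin_eq (ls : List String) :
    gcsCatMin ls =
      if ls.contains "china" || ls.contains "russia" then 1
      else if ls.contains "india" || ls.contains "bangladesh" || ls.contains "nepal" ||
              ls.contains "bhutan" || ls.contains "sri lanka" then 2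
      else 5 := by
  induction ls with
  | nil => simp [gcsCatMin]
  | cons l ls ih =>
    simp only [gcsCatMin, ih, gcsCat_getD, List.contains_cons]
    by_cases h1 : l = "china" <;> by_cases h2 : l = "russia" <;>
    by_cases h3 : l = "india" <;> by_cases h4 : l = "bangladesh" <;>
    by_cases h5 : l = "nepal" <;> by_cases h6 : l = "bhutan" <;>
    by_cases h7 : l = "sri lanka" <;>
      simp_all [Bool.beq_comm] <;> split_ifs <;> omega

theorem gcs_fold_rels (rs : List String) (b : Nat) :
    rs.foldl (fun b r =>
      if r = "TRADE_PARTNER" then min b 3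
      else if r = "SIGNATORY_TO" then min b 4
      else b) b =
      (if rs.contains "TRADE_PARTNER" then min b 3
       else if rs.contains "SIGNATORY_TO" then min b 4
       else b) := by
  induction rs generalizing b with
  | nil => simp
  | cons r rs ih =>
    simp only [List.foldl_cons, ih, List.contains_cons]
    by_cases h1 : r = "TRADE_PARTNER" <;> by_cases h2 : r = "SIGNATORY_TO" <;>
      simp_all [Bool.beq_comm]

-- A's cascade equals B's min-priority table lookup, for any truth values of the
-- six conditions and any count string n.
theorem gcs_key (q1 q2 c2 c3 c4 c5 : Bool) (n : String) :
    (if q1 then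
        (if q2 then "Indo-Pacific QUAD Partners" else
          (if c2 then "Eurasian Strategic Partners"
           else if c3 then "South Asian Regional Partners"
           else if c4 then "Trade Partnership Network (" ++ n ++ " members)"
           else if c5 then "Treaty Signatories (" ++ n ++ " members)"
           else "Geopolitical Community (" ++ n ++ " members)"))
      else
        (if c2 then "Eurasian Strategic Partners"
         else if c3 then "South Asian Regional Partners"
         else if c4 then "Trade Partnership Network (" ++ n ++ " members)"
         else if c5 then "Treaty Signatories (" ++ n ++ " members)"
         else "Geopolitical Community (" ++ n ++ " members)")) =
    (["Indo-Pacific QUAD Partners",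
      "Eurasian Strategic Partners",
      "South Asian Regional Partners",
      "Trade Partnership Network (" ++ n ++ " members)",
      "Treaty Signatories (" ++ n ++ " members)",
      "Geopolitical Community (" ++ n ++ " members)"].getD
        (if c4 then
           min (if q1 && q2 then 0 else min 5 (if c2 then 1 else if c3 then 2 else 5)) 3
         else if c5 then
           min (if q1 && q2 then 0 else min 5 (if c2 then 1 else if c3 then 2 else 5)) 4
         else
           (if q1 && q2 then 0 else min 5 (if c2 then 1 else if c3 then 2 else 5))) "") := by
  cases q1 <;> cases q2 <;> cases c2 <;> cases c3 <;> cases c4 <;> cases c5 <;> rfl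

-- ===== VERDICT (by name: the statement is the Claim_ definition above) =====
theorem generate_community_summary_py_spec : Claim_equal_generate_community_summary_py := by
  intro members rel_types _
  unfold Spec_generate_community_summary_py generate_community_summary_py
    generate_community_summary_py_alt
  rw [gcs_fold_members _ _ _ _ (by omega)]
  simp only [gcs_fold_rels, gcs_catMin_eq, Bool.false_or, gcsAnch, gcsUsa]
  exact gcs_key _ _ _ _ _ _ _
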